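-- pv_equiv track=rewrite | github.com/M-krizz/BlueprintGPT | learned/planner/prepare_dataset.py | _program_signature
-- ===== SOURCE A (Python) =====
-- def _program_signature(record: dict) -> str:
--     counts: dict[str, int] = {}
--     for room in record.get("rooms", []):
--         room_type = str(room.get("type") or "").strip()
--         if not room_type:
--             continue
--         counts[room_type] = counts.get(room_type, 0) + 1
--     if not counts:
--         return "empty"
--     return "|".join(f"{room_type}:{counts[room_type]}" for room_type in sorted(counts))
-- ===== SOURCE B (Python) =====
-- def _program_signature(record: dict) -> str:
--     types = sorted(
--         t
--         for room in record.get("rooms", [])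
--         for t in [str(room.get("type") or "").strip()]
--         if t
--     )
--     if not types:
--         return "empty"
--     parts = []
--     rest = types
--     while rest:
--         head = rest[0]
--         k = 1
--         while k < len(rest) and rest[k] == head:
--             k += 1
--         parts.append(f"{head}:{k}")
--         rest = rest[k:]
--     return "|".join(parts)
-- ===== Notes on version B (the rewrite author's own statement) =====
-- stated objective: alternative
-- what changed: A builds a hash-map counter over the rooms and then sorts its keys; B collects the cleaned non-empty types into a plain list, sorts the whole list once, and emits each 'type:count' by scanning consecutive runs of the sorted list, so no count dictionary is maintained.
import Mathlib
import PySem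

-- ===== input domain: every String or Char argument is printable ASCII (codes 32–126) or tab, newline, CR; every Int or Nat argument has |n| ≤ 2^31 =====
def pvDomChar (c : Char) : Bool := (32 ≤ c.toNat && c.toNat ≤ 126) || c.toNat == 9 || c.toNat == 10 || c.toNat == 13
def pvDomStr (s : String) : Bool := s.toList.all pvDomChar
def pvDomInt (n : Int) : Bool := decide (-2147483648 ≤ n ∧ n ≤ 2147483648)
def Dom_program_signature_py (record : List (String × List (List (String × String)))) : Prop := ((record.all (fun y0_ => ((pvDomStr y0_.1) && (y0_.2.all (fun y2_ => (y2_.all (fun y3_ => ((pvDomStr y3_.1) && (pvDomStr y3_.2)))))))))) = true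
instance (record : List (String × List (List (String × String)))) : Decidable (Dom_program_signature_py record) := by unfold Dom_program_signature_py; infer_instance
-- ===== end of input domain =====

-- B replaces A's hash-count-then-sort-the-keys by sort-all-cleaned-types-then-scan-runs (alternative decomposition, same result).

-- ===== PORT A =====
-- str(room.get("type") or "").strip() : 'x or ""' is "" exactly when the lookup is absent or "", so it is getD "".
-- The identical cleaning expression appears in both Pythons, so both ports share this helper.
def pvClean (room : List (String × String)) : String :=
  PySem.Str.strip (((PySem.Dict.mk room).get? "type").getD "")

def program_signature_py (record : List (String × List (List (String × String)))) : String :=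
  let rooms := ((PySem.Dict.mk record).get? "rooms").getD []
  let counts : PySem.Dict String Int :=
    rooms.foldl (fun d room =>
      let rt := pvClean room
      if rt == "" then d else d.insert rt (d.getD rt 0 + 1)) PySem.Dict.empty
  if counts.size = 0 then "empty"
  else
    -- counts[rt]: rt ranges over counts' own keys, so the lookup always succeeds; getD 0 is exact here
    PySem.Str.join "|" ((PySem.List.sorted counts.keys (fun k => k) false).map
      (fun rt => rt ++ ":" ++ PySem.Int.toStr (counts.getD rt 0)))

-- ===== PORT B =====
-- Source B's while-loop over the sorted list: one run (head plus its k-1 equal successors) peeled off per step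
def pvGroups : List String → List (String × Int)
  | [] => []
  | x :: xs =>
    (x, 1 + ((xs.takeWhile (fun t => t == x)).length : Int)) ::
      pvGroups (xs.dropWhile (fun t => t == x))
termination_by l => l.length
decreasing_by
  simpa using Nat.lt_succ_of_le (List.length_dropWhile_le _ _)

def program_signature_py_alt (record : List (String × List (List (String × String)))) : String :=
  let rooms := ((PySem.Dict.mk record).get? "rooms").getD []
  let types := PySem.List.sorted ((rooms.map pvClean).filter (fun t => t ≠ "")) (fun t => t) false
  if types.isEmpty then "empty"
  else PySem.Str.join "|" ((pvGroups types).map (fun p => p.1 ++ ":" ++ PySem.Int.toStr p.2))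

-- ===== PRECONDITION & SPEC =====
def Spec_program_signature_py (record : List (String × List (List (String × String)))) (out : String) : Prop := out = program_signature_py_alt record
instance (record : List (String × List (List (String × String)))) (out : String) : Decidable (Spec_program_signature_py record out) := by unfold Spec_program_signature_py; infer_instance

-- ===== CLAIM (what is proved, stated in full; the proofs are below) =====
def Claim_equal_program_signature_py : Prop := ∀ (record : List (String × List (List (String × String)))), Dom_program_signature_py record → Spec_program_signature_py record (program_signature_py record)

-- ===== LEMMAS AND PROOFS =====

-- membership in the group firsts is membership in the list (no sortedness needed)
theorem pvGroups_mem_fst (s : List String) (k : String) :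
    k ∈ (pvGroups s).map Prod.fst ↔ k ∈ s := by
  induction s using pvGroups.induct with
  | case1 => simp [pvGroups]
  | case2 x xs ih =>
    rw [pvGroups]
    simp only [List.map_cons, List.mem_cons, ih]
    constructor
    · rintro (rfl | h)
      · exact Or.inl rfl
      · exact Or.inr (List.dropWhile_sublist _ |>.mem h)
    · rintro (rfl | h)
      · exact Or.inl rfl
      · conv at h => rw [← List.takeWhile_append_dropWhile (p := fun t => t == x) (l := xs)]
        rcases List.mem_append.mp h with h | h
        · exact Or.inl (by simpa using List.mem_takeWhile_imp h)
        · exact Or.inr h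

-- in a sorted list, everything surviving the dropWhile of the head's run is strictly above the head
theorem pv_lt_of_mem_dropWhile (x : String) (xs : List String)
    (hs : (x :: xs).Pairwise (· ≤ ·)) :
    ∀ y ∈ xs.dropWhile (fun t => t == x), x < y := by
  induction xs with
  | nil => simp
  | cons z zs ih =>
    rw [List.dropWhile_cons]
    split
    · rename_i hz
      refine ih ?_
      have h1 := List.pairwise_cons.mp hs
      have h2 := List.pairwise_cons.mp h1.2
      exact List.pairwise_cons.mpr ⟨fun y hy => h1.1 y (.tail _ hy), h2.2⟩
    · rename_i hz
      intro y hy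
      have h1 := List.pairwise_cons.mp hs
      have h2 := List.pairwise_cons.mp h1.2
      have hzx : z ≠ x := by simpa using hz
      have hxz : x < z := lt_of_le_of_ne (h1.1 z (.head _)) (Ne.symm hzx)
      rcases List.mem_cons.mp hy with rfl | hy
      · exact hxz
      · exact lt_of_lt_of_le hxz (h2.1 y hy)

theorem pvGroups_fst_pairwise (s : List String) (hs : s.Pairwise (· ≤ ·)) :
    ((pvGroups s).map Prod.fst).Pairwise (· < ·) := by
  induction s using pvGroups.induct with
  | case1 => simp [pvGroups]
  | case2 x xs ih =>
    rw [pvGroups]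
    have hds : (xs.dropWhile (fun t => t == x)).Pairwise (· ≤ ·) :=
      hs.sublist ((List.dropWhile_sublist _).trans (List.sublist_cons_self _ _))
    refine List.pairwise_cons.mpr ⟨?_, ih hds⟩
    intro k hk
    exact pv_lt_of_mem_dropWhile x xs hs k ((pvGroups_mem_fst _ k).mp hk)

-- each group's second component is the multiplicity of its type in the sorted list
theorem pvGroups_snd_count (s : List String) (hs : s.Pairwise (· ≤ ·)) :
    ∀ p ∈ pvGroups s, p.2 = (s.count p.1 : Int) := by
  induction s using pvGroups.induct with
  | case1 => simp [pvGroups]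
  | case2 x xs ih =>
    rw [pvGroups]
    have hxs : xs.takeWhile (fun t => t == x) ++ xs.dropWhile (fun t => t == x) = xs :=
      List.takeWhile_append_dropWhile
    have hall : ∀ y ∈ xs.takeWhile (fun t => t == x), y = x := by
      intro y hy; simpa using List.mem_takeWhile_imp hy
    have hlt := pv_lt_of_mem_dropWhile x xs hs
    have hds : (xs.dropWhile (fun t => t == x)).Pairwise (· ≤ ·) :=
      hs.sublist ((List.dropWhile_sublist _).trans (List.sublist_cons_self _ _))
    intro p hp
    rcases List.mem_cons.mp hp with rfl | hp
    · have h1 : (x :: xs).count x = xs.count x + 1 := List.count_cons_self ..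
      have h2 : (xs.takeWhile (fun t => t == x)).count x = (xs.takeWhile (fun t => t == x)).length :=
        List.count_eq_length.mpr (fun b hb => (hall b hb).symm)
      have h3 : (xs.dropWhile (fun t => t == x)).count x = 0 :=
        List.count_eq_zero.mpr (fun h => lt_irrefl x (hlt x h))
      have h4 : xs.count x = (xs.takeWhile (fun t => t == x)).count x + (xs.dropWhile (fun t => t == x)).count x := by
        conv_lhs => rw [← hxs]
        exact List.count_append ..
      simp only []
      rw [h1, h4, h2, h3]
      push_cast
      ring
    · have hpd : p.1 ∈ xs.dropWhile (fun t => t == x) :=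
        (pvGroups_mem_fst _ p.1).mp (List.mem_map_of_mem hp)
      have hne : p.1 ≠ x := ne_of_gt (hlt _ hpd)
      have h0 : (x :: xs).count p.1 = xs.count p.1 := List.count_cons_of_ne hne.symm
      have h4 : xs.count p.1 = (xs.takeWhile (fun t => t == x)).count p.1 + (xs.dropWhile (fun t => t == x)).count p.1 := by
        conv_lhs => rw [← hxs]
        exact List.count_append ..
      have h2 : (xs.takeWhile (fun t => t == x)).count p.1 = 0 :=
        List.count_eq_zero.mpr (fun h => hne (hall _ h))
      rw [ih hds p hp, h0, h4, h2]
      simp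

theorem pv_ofList_eq_nil_iff (ts : List String) : PySem.Set.ofList ts = [] ↔ ts = [] := by
  constructor
  · intro h
    rw [List.eq_nil_iff_forall_not_mem]
    intro x hx
    have := (PySem.Set.mem_ofList (xs := ts) (y := x)).mpr hx
    simp [h] at this
  · rintro rfl; rfl

-- the heart of the equivalence: over ANY cleaned type list ts, A's sorted-counter rendering equals B's sort-then-group rendering
theorem pv_main (ts : List String) :
    (if (PySem.Dict.counter ts (κ := String)).size = 0 then "empty" else
      PySem.Str.join "|" ((PySem.List.sorted (PySem.Dict.counter ts).keys (fun k => k) false).map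
        (fun rt => rt ++ ":" ++ PySem.Int.toStr ((PySem.Dict.counter ts).getD rt 0))))
    = (if (PySem.List.sorted ts (fun t => t) false).isEmpty then "empty"
      else PySem.Str.join "|" ((pvGroups (PySem.List.sorted ts (fun t => t) false)).map
        (fun p => p.1 ++ ":" ++ PySem.Int.toStr p.2))) := by
  have hsize : (PySem.Dict.counter ts (κ := String)).size = (PySem.Set.ofList ts).length := by
    simp [PySem.Dict.size, PySem.Dict.items_counter]
  by_cases hts : ts = []
  · subst hts; rfl
  · have h1 : ¬ (PySem.Dict.counter ts (κ := String)).size = 0 := by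
      rw [hsize]
      simp [List.length_eq_zero_iff, pv_ofList_eq_nil_iff, hts]
    have h2 : ¬ (PySem.List.sorted ts (fun t => t) false).isEmpty := by
      simp [List.isEmpty_iff, PySem.List.sorted_eq_nil_iff, hts]
    rw [if_neg h1, if_neg h2]
    set s := PySem.List.sorted ts (fun t => t) false with hsdef
    have hs : s.Pairwise (· ≤ ·) := PySem.List.sorted_pairwise ts (fun t => t)
    have hnd : ((pvGroups s).map Prod.fst).Nodup :=
      (pvGroups_fst_pairwise s hs).imp ne_of_lt
    have hperm : ((pvGroups s).map Prod.fst).Perm (PySem.Set.ofList ts) := by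
      rw [List.perm_ext_iff_of_nodup hnd (PySem.Set.nodup_ofList ts)]
      intro k
      rw [pvGroups_mem_fst, PySem.Set.mem_ofList, hsdef, PySem.List.mem_sorted]
    have hsorted : PySem.List.sorted (PySem.Set.ofList ts) (fun k => k) false
        = (pvGroups s).map Prod.fst :=
      PySem.List.sorted_eq_of_perm_of_pairwise_lt _ _ _ hperm (pvGroups_fst_pairwise s hs)
    rw [PySem.Dict.keys_counter, hsorted, List.map_map]
    congr 1
    apply List.map_congr_left
    intro p hp
    have hc := pvGroups_snd_count s hs p hp
    have hcount : s.count p.1 = ts.count p.1 :=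
      (PySem.List.sorted_perm ts (fun t => t) false).count_eq p.1
    simp only [Function.comp_apply, PySem.Dict.getD_counter, hc, hcount]

-- A's filtered counting loop builds exactly the counter of the cleaned non-empty type list
theorem pv_fold_eq_counter (rooms : List (List (String × String))) :
    rooms.foldl (fun d room =>
      let rt := pvClean room
      if rt == "" then d else d.insert rt (d.getD rt 0 + 1)) PySem.Dict.empty
    = PySem.Dict.counter ((rooms.map pvClean).filter (fun t => t ≠ "")) := by
  rw [← PySem.Dict.foldl_insert_getD_add_one_eq_counter, List.foldl_filter, List.foldl_map]
  have hfun : (fun (d : PySem.Dict String Int) room =>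
      let rt := pvClean room
      if rt == "" then d else d.insert rt (d.getD rt 0 + 1))
      = (fun (d : PySem.Dict String Int) room =>
        if decide (pvClean room ≠ "") = true then d.insert (pvClean room) (d.getD (pvClean room) 0 + 1) else d) := by
    funext d room
    by_cases h : pvClean room = "" <;> simp [h]
  rw [hfun]

-- ===== VERDICT (by name: the statement is the Claim_ definition above) =====
theorem program_signature_py_spec : Claim_equal_program_signature_py := by
  intro record _
  show program_signature_py record = program_signature_py_alt record
  simp only [program_signature_py, program_signature_py_alt, pv_fold_eq_counter]
  exact pv_main _
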